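-- pv_equiv track=rewrite | github.com/zhangcheng1006/Kernel_Method_Data_Challenge | kernels.py | gapped_kernel
-- ===== SOURCE A (Python) =====
-- def gapped_kernel(x, y, k=6):
--     '''Implementation of spectrum kernel with gaps
--     '''
--     l = len(x)
--     spectrum_dict = {}
--     for i in range(l-k):
--         sub_x = [x[i+k-1]]
--         sub_y = [y[i+k-1]]
--         for j in range(1, k):
--             tmp_x = []
--             tmp_y = []
--             for a in range(len(sub_x)):
--                 if spectrum_dict.get(sub_x[a]) is not None:
--                     spectrum_dict[sub_x[a]][0] += 1
--                 else:
--                     spectrum_dict[sub_x[a]] = [1, 0]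
--                 if spectrum_dict.get(sub_y[a]) is not None:
--                     spectrum_dict[sub_y[a]][1] += 1
--                 else:
--                     spectrum_dict[sub_y[a]] = [0, 1]
--
--                 tmp_x.append(x[i+k-j-1] + sub_x[a])
--                 tmp_y.append(y[i+k-j-1] + sub_y[a])
--                 tmp_x.append('N' + sub_x[a])
--                 tmp_y.append('N' + sub_y[a])
--             sub_x = tmp_x
--             sub_y = tmp_y
--
--         for a in range(len(sub_x)):
--             if spectrum_dict.get(sub_x[a]) is not None:
--                 spectrum_dict[sub_x[a]][0] += 1
--             else:
--                 spectrum_dict[sub_x[a]] = [1, 0]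
--             if spectrum_dict.get(sub_y[a]) is not None:
--                 spectrum_dict[sub_y[a]][1] += 1
--             else:
--                 spectrum_dict[sub_y[a]] = [0, 1]
--
--     res = 0
--     for value in spectrum_dict.values():
--         res += value[0] * value[1]
--     return res
-- ===== SOURCE B (Python) =====
-- def gapped_kernel(x, y, k=6):
--     '''Gapped spectrum kernel: direct bitmask enumeration of the gapped
--     substrings of each length 1..k into two separate counters.
--     '''
--     l = len(x)
--     cx = {}
--     cy = {}
--     for i in range(l - k):
--         for m in range(1, k + 1):
--             base = i + k - m
--             for t in range(1 << (m - 1)):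
--                 sx = ''.join('N' if (t >> p) & 1 else x[base + p] for p in range(m - 1)) + x[i + k - 1]
--                 sy = ''.join('N' if (t >> p) & 1 else y[base + p] for p in range(m - 1)) + y[i + k - 1]
--                 cx[sx] = cx.get(sx, 0) + 1
--                 cy[sy] = cy.get(sy, 0) + 1
--     return sum(c * cy[s] for s, c in cx.items() if s in cy)
-- ===== Notes on version B (the rewrite author's own statement) =====
-- stated objective: alternative
-- what changed: B replaces A's incremental doubling of partial-string lists feeding one shared dict of [count_x, count_y] pairs by a direct closed-form enumeration: for each window, each length m in 1..k and each bitmask over the m-1 non-anchor positions it builds the gapped substring directly and increments two separate counters, then sums cx[s]*cy[s] over shared keys.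
-- outside the precondition, e.g. on gapped_kernel('ab', 'ab', 0): A returns 2, B returns 0; on gapped_kernel('abc', '', 2): A raises IndexError, B raises IndexError
import Mathlib
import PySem

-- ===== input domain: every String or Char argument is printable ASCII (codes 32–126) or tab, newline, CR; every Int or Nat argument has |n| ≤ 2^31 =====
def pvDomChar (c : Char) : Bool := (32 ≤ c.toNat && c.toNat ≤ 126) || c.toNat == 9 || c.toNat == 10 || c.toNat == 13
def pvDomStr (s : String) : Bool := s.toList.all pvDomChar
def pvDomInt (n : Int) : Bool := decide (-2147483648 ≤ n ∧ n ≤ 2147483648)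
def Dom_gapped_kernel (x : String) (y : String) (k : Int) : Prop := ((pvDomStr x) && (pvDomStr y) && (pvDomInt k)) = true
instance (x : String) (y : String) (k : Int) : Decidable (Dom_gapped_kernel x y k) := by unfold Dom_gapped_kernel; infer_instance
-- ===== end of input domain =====

-- B re-implements the gapped spectrum kernel by enumerating each counted gapped substring
-- directly from a bitmask (per window, per length 1..k) into two separate counters, instead
-- of A's incremental doubling of partial-string lists into one shared dict; objective: alternative.

-- ===== PORT A =====
-- x[i] for an in-range index (Pre_ guarantees every index A uses is in range; Python raises IndexError outside)
def pvGet (cs : List Char) (i : Int) : Char :=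
  (PySem.List.pyGet? cs i).getD '!'

-- spectrum_dict[s][0] += 1 / spectrum_dict[s] = [1, 0]
def pvInc1 (d : PySem.Dict (List Char) (Int × Int)) (s : List Char) : PySem.Dict (List Char) (Int × Int) :=
  match d.get? s with
  | some v => d.insert s (v.1 + 1, v.2)
  | none => d.insert s (1, 0)

-- spectrum_dict[s][1] += 1 / spectrum_dict[s] = [0, 1]
def pvInc2 (d : PySem.Dict (List Char) (Int × Int)) (s : List Char) : PySem.Dict (List Char) (Int × Int) :=
  match d.get? s with
  | some v => d.insert s (v.1, v.2 + 1)
  | none => d.insert s (0, 1)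

def gapped_kernel (x : String) (y : String) (k : Int) : Int :=
  let xs := x.toList
  let ys := y.toList
  let l : Int := xs.length
  let d := (PySem.List.pyRange 0 (l - k) 1).foldl (fun d i =>
    -- sub_x = [x[i+k-1]]; sub_y = [y[i+k-1]]
    let st0 := (d, ([[pvGet xs (i + k - 1)]] : List (List Char)), ([[pvGet ys (i + k - 1)]] : List (List Char)))
    -- for j in range(1, k): count current subs, build tmp lists
    let st := (PySem.List.pyRange 1 k 1).foldl (fun st j =>
      (st.2.1.zip st.2.2).foldl (fun st2 ab =>
        (pvInc2 (pvInc1 st2.1 ab.1) ab.2,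
         st2.2.1 ++ [pvGet xs (i + k - j - 1) :: ab.1, 'N' :: ab.1],
         st2.2.2 ++ [pvGet ys (i + k - j - 1) :: ab.2, 'N' :: ab.2]))
        (st.1, ([] : List (List Char)), ([] : List (List Char)))) st0
    -- final counting loop over the length-k subs
    (st.2.1.zip st.2.2).foldl (fun d ab => pvInc2 (pvInc1 d ab.1) ab.2) st.1)
    PySem.Dict.empty
  d.values.foldl (fun r v => r + v.1 * v.2) 0

-- ===== PORT B =====
-- (t >> p) & 1  (t, p are always ≥ 0 where B uses this)
def pvBit (t p : Int) : Bool := ((t.toNat >>> p.toNat) &&& 1) == 1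

-- 'N'/real-char string of length m ending with the anchor x[i+k-1]
def pvRow (cs : List Char) (kk : Int) (i : Int) (m : Int) (t : Int) : List Char :=
  ((PySem.List.pyRange 0 (m - 1) 1).map (fun p => if pvBit t p then 'N' else pvGet cs (i + kk - m + p))) ++ [pvGet cs (i + kk - 1)]

def gapped_kernel_alt (x : String) (y : String) (k : Int) : Int :=
  let xs := x.toList
  let ys := y.toList
  let l : Int := xs.length
  let cc := (PySem.List.pyRange 0 (l - k) 1).foldl (fun cc i =>
    (PySem.List.pyRange 1 (k + 1) 1).foldl (fun cc m =>
      (PySem.List.pyRange 0 (((1 <<< (m - 1).toNat : Nat) : Int)) 1).foldl (fun cc t =>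
        (cc.1.insert (pvRow xs k i m t) (cc.1.getD (pvRow xs k i m t) 0 + 1),
         cc.2.insert (pvRow ys k i m t) (cc.2.getD (pvRow ys k i m t) 0 + 1))) cc) cc)
    ((PySem.Dict.empty : PySem.Dict (List Char) Int), (PySem.Dict.empty : PySem.Dict (List Char) Int))
  cc.1.items.foldl (fun r p => if cc.2.contains p.1 then r + p.2 * cc.2.getD p.1 0 else r) 0

-- ===== PRECONDITION & SPEC =====
-- Pre_ excludes k ≤ 0 — outside the natural domain of a k-spectrum kernel, where A's x[i+k-1]
-- wraps around Python-style — and the inputs where y is too short and A raises IndexError.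
def Pre_gapped_kernel (x : String) (y : String) (k : Int) : Prop :=
  1 ≤ k ∧ ((x.length : Int) ≤ k ∨ (x.length : Int) - 1 ≤ (y.length : Int))
instance (x : String) (y : String) (k : Int) : Decidable (Pre_gapped_kernel x y k) := by
  unfold Pre_gapped_kernel; infer_instance

def pvWitness_gapped_kernel : String × String × Int := ("abcab", "abcbb", 2)

def Spec_gapped_kernel (x : String) (y : String) (k : Int) (out : Int) : Prop := out = gapped_kernel_alt x y k
instance (x : String) (y : String) (k : Int) (out : Int) : Decidable (Spec_gapped_kernel x y k out) := by unfold Spec_gapped_kernel; infer_instance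

-- ===== CLAIM (what is proved, stated in full; the proofs are below) =====
def Claim_equal_gapped_kernel : Prop := ∀ (x : String) (y : String) (k : Int), Dom_gapped_kernel x y k → Pre_gapped_kernel x y k → Spec_gapped_kernel x y k (gapped_kernel x y k)

-- ===== LEMMAS AND PROOFS =====

-- one count event: the x-string and the y-string counted together
def pvStep (d : PySem.Dict (List Char) (Int × Int)) (ab : List Char × List Char) : PySem.Dict (List Char) (Int × Int) :=
  pvInc2 (pvInc1 d ab.1) ab.2

-- Nat-indexed closed form of a gapped substring of length n+1 ending at i+kk-1
def pvRowN (cs : List Char) (kk : Int) (i : Int) (n : Nat) (t : Nat) : List Char :=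
  ((List.range n).map (fun p => if Nat.testBit t p then 'N' else pvGet cs (i + kk - 1 - n + p))) ++ [pvGet cs (i + kk - 1)]

-- A's per-window partial-string pair list after n extensions (strings of length n+1)
def pvStage (xs ys : List Char) (kk : Int) (i : Int) : Nat → List (List Char × List Char)
  | 0 => [([pvGet xs (i + kk - 1)], [pvGet ys (i + kk - 1)])]
  | n+1 => (pvStage xs ys kk i n).flatMap (fun ab =>
      [(pvGet xs (i + kk - 1 - (n+1)) :: ab.1, pvGet ys (i + kk - 1 - (n+1)) :: ab.2),
       ('N' :: ab.1, 'N' :: ab.2)])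

-- all count events of one window: stages 0..N concatenated
def pvEv (xs ys : List Char) (kk : Int) (i : Int) (N : Nat) : List (List Char × List Char) :=
  (List.range (N+1)).flatMap (pvStage xs ys kk i)

lemma pv_bit_cast (tn pn : Nat) : pvBit (tn : Int) (pn : Int) = Nat.testBit tn pn := by
  simp [pvBit, Nat.shiftRight_eq_div_pow, Nat.and_one_is_mod, Nat.testBit, Nat.one_and_eq_mod_two]

lemma pv_range_double (n : Nat) :
    List.range (2 * n) = (List.range n).flatMap (fun q => [2 * q, 2 * q + 1]) := by
  induction n with
  | zero => simp
  | succ n ih =>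
    rw [show 2 * (n+1) = (2*n + 1) + 1 by ring, List.range_succ, List.range_succ,
        List.range_succ, ih]
    simp [List.flatMap_append]

lemma pv_rowN_bit (cs : List Char) (kk i : Int) (n q b : Nat) (hb : b < 2) :
    pvRowN cs kk i (n+1) (2 * q + b)
      = (if b = 1 then 'N' else pvGet cs (i + kk - 1 - (n+1))) :: pvRowN cs kk i n q := by
  unfold pvRowN
  rw [List.range_succ_eq_map]
  simp only [List.map_cons, List.map_map, List.cons_append]
  congr 1
  · rw [show Nat.testBit (2*q+b) 0 = decide (b = 1) by
      simp [Nat.testBit_zero]; omega]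
    simp
  · congr 1
    apply List.map_congr_left
    intro p _
    simp only [Function.comp_apply]
    rw [show Nat.testBit (2*q+b) (Nat.succ p) = Nat.testBit q p by
      rw [Nat.succ_eq_add_one, Nat.testBit_add_one]
      congr 1; omega]
    rw [show i + kk - 1 - ((n:Nat)+1:Nat) + (Nat.succ p : Nat) = i + kk - 1 - (n:Nat) + (p:Nat) by
      push_cast; ring]


lemma pv_stage_eq (xs ys : List Char) (kk i : Int) (n : Nat) :
    pvStage xs ys kk i n
      = (List.range (2 ^ n)).map (fun t => (pvRowN xs kk i n t, pvRowN ys kk i n t)) := by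
  induction n with
  | zero => simp [pvStage, pvRowN]
  | succ n ih =>
    rw [show pvStage xs ys kk i (n+1) = (pvStage xs ys kk i n).flatMap (fun ab =>
      [(pvGet xs (i + kk - 1 - (n+1)) :: ab.1, pvGet ys (i + kk - 1 - (n+1)) :: ab.2),
       ('N' :: ab.1, 'N' :: ab.2)]) from rfl, ih,
      show (2:Nat)^(n+1) = 2 * 2^n by ring, pv_range_double]
    rw [List.flatMap_map, List.map_flatMap]
    apply List.flatMap_congr
    intro q hq
    simp only [List.map_cons, List.map_nil]
    rw [show 2 * q = 2 * q + 0 by ring] at *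
    rw [pv_rowN_bit xs kk i n q 0 (by omega), pv_rowN_bit ys kk i n q 0 (by omega),
        pv_rowN_bit xs kk i n q 1 (by omega), pv_rowN_bit ys kk i n q 1 (by omega)]
    simp

lemma pv_inner (a b : Char) (L : List (List Char × List Char))
    (d : PySem.Dict (List Char) (Int × Int)) (tx ty : List (List Char)) :
    L.foldl (fun st2 ab =>
        (pvInc2 (pvInc1 st2.1 ab.1) ab.2,
         st2.2.1 ++ [a :: ab.1, 'N' :: ab.1],
         st2.2.2 ++ [b :: ab.2, 'N' :: ab.2])) (d, tx, ty)
      = (L.foldl pvStep d,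
         tx ++ L.flatMap (fun ab => [a :: ab.1, 'N' :: ab.1]),
         ty ++ L.flatMap (fun ab => [b :: ab.2, 'N' :: ab.2])) := by
  induction L generalizing d tx ty with
  | nil => simp
  | cons p L ih => simp [ih, pvStep]

lemma pv_foldl_flatMap {α β γ : Type} (l : List α) (g : α → List β) (f : γ → β → γ) (init : γ) :
    (l.flatMap g).foldl f init = l.foldl (fun acc x => (g x).foldl f acc) init := by
  induction l generalizing init with
  | nil => rfl
  | cons x l ih => simp [List.foldl_append, ih]

lemma pv_jloopN (xs ys : List Char) (k i : Int) (M : Nat) (d : PySem.Dict (List Char) (Int × Int)) :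
    (List.range M).foldl (fun st n =>
        (st.2.1.zip st.2.2).foldl (fun st2 ab =>
          (pvInc2 (pvInc1 st2.1 ab.1) ab.2,
           st2.2.1 ++ [pvGet xs (i + k - (1 + (n : Int)) - 1) :: ab.1, 'N' :: ab.1],
           st2.2.2 ++ [pvGet ys (i + k - (1 + (n : Int)) - 1) :: ab.2, 'N' :: ab.2]))
          (st.1, ([] : List (List Char)), ([] : List (List Char))))
        (d, (pvStage xs ys k i 0).map Prod.fst, (pvStage xs ys k i 0).map Prod.snd)
      = (((List.range M).flatMap (pvStage xs ys k i)).foldl pvStep d,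
         (pvStage xs ys k i M).map Prod.fst, (pvStage xs ys k i M).map Prod.snd) := by
  induction M with
  | zero => simp
  | succ M ih =>
    rw [List.range_succ, List.foldl_append, ih]
    simp only [List.foldl_cons, List.foldl_nil]
    rw [List.zip_map', show ((fun x => (Prod.fst x, Prod.snd x)) : List Char × List Char → List Char × List Char) = id from funext (fun x => rfl), List.map_id, pv_inner]
    have hidx : i + k - (1 + (M : Int)) - 1 = i + k - 1 - ((M : Int) + 1) := by ring
    have hstage : pvStage xs ys k i (M+1) = (pvStage xs ys k i M).flatMap (fun ab =>
      [(pvGet xs (i + k - 1 - ((M:Int)+1)) :: ab.1, pvGet ys (i + k - 1 - ((M:Int)+1)) :: ab.2),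
       ('N' :: ab.1, 'N' :: ab.2)]) := by
      rw [show pvStage xs ys k i (M+1) = (pvStage xs ys k i M).flatMap (fun ab =>
        [(pvGet xs (i + k - 1 - ((M:Nat)+1:Nat)) :: ab.1, pvGet ys (i + k - 1 - ((M:Nat)+1:Nat)) :: ab.2),
         ('N' :: ab.1, 'N' :: ab.2)]) from rfl]
      push_cast
      rfl
    refine congrArg₂ Prod.mk ?_ (congrArg₂ Prod.mk ?_ ?_)
    · rw [List.flatMap_append, List.foldl_append]
      simp
    · rw [hstage, List.map_flatMap]
      simp [hidx]
    · rw [hstage, List.map_flatMap]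
      simp [hidx]

lemma pv_window (xs ys : List Char) (k i : Int)
    (d : PySem.Dict (List Char) (Int × Int)) :
    (let st0 := (d, ([[pvGet xs (i + k - 1)]] : List (List Char)), ([[pvGet ys (i + k - 1)]] : List (List Char)))
     let st := (PySem.List.pyRange 1 k 1).foldl (fun st j =>
       (st.2.1.zip st.2.2).foldl (fun st2 ab =>
         (pvInc2 (pvInc1 st2.1 ab.1) ab.2,
          st2.2.1 ++ [pvGet xs (i + k - j - 1) :: ab.1, 'N' :: ab.1],
          st2.2.2 ++ [pvGet ys (i + k - j - 1) :: ab.2, 'N' :: ab.2]))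
         (st.1, ([] : List (List Char)), ([] : List (List Char)))) st0
     (st.2.1.zip st.2.2).foldl (fun d ab => pvInc2 (pvInc1 d ab.1) ab.2) st.1)
      = (pvEv xs ys k i (k-1).toNat).foldl pvStep d := by
  simp only
  rw [PySem.List.pyRange_one, List.foldl_map]
  have h0 : (d, ([[pvGet xs (i + k - 1)]] : List (List Char)), ([[pvGet ys (i + k - 1)]] : List (List Char)))
      = (d, (pvStage xs ys k i 0).map Prod.fst, (pvStage xs ys k i 0).map Prod.snd) := rfl
  rw [h0, pv_jloopN xs ys k i (k-1).toNat d]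
  rw [List.zip_map', show ((fun x => (Prod.fst x, Prod.snd x)) : List Char × List Char → List Char × List Char) = id from funext (fun x => rfl), List.map_id]
  rw [pvEv, List.range_succ, List.flatMap_append, List.foldl_append]
  simp
  rfl

lemma pv_inc1_eq (d : PySem.Dict (List Char) (Int × Int)) (s : List Char) :
    pvInc1 d s = d.insert s ((d.getD s (0,0)).1 + 1, (d.getD s (0,0)).2) := by
  unfold pvInc1
  cases h : d.get? s <;> simp [PySem.Dict.getD_eq_get?_getD, h]

lemma pv_inc2_eq (d : PySem.Dict (List Char) (Int × Int)) (s : List Char) :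
    pvInc2 d s = d.insert s ((d.getD s (0,0)).1, (d.getD s (0,0)).2 + 1) := by
  unfold pvInc2
  cases h : d.get? s <;> simp [PySem.Dict.getD_eq_get?_getD, h]

lemma pv_getD_fold (E : List (List Char × List Char)) (d : PySem.Dict (List Char) (Int × Int))
    (s : List Char) :
    (E.foldl pvStep d).getD s (0,0)
      = ((d.getD s (0,0)).1 + ((E.map Prod.fst).count s : Int),
         (d.getD s (0,0)).2 + ((E.map Prod.snd).count s : Int)) := by
  induction E generalizing d with
  | nil => simp
  | cons ab E ih =>
    simp only [List.foldl_cons, List.map_cons, ih]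
    rw [pvStep, pv_inc1_eq, pv_inc2_eq]
    simp only [PySem.Dict.getD_insert]
    obtain ⟨u, v⟩ := ab
    by_cases huv : u = v <;> by_cases h1 : s = u <;> by_cases h2 : s = v <;>
      simp_all [List.count_cons] <;> first | tauto | (constructor <;> first | omega | tauto) | omega

lemma pv_mem_keys_fold (E : List (List Char × List Char)) (d : PySem.Dict (List Char) (Int × Int))
    (s : List Char) :
    s ∈ (E.foldl pvStep d).keys ↔ s ∈ d.keys ∨ s ∈ E.map Prod.fst ∨ s ∈ E.map Prod.snd := by
  induction E generalizing d with
  | nil => simp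
  | cons ab E ih =>
    simp only [List.foldl_cons, List.map_cons, ih, pvStep, pv_inc1_eq, pv_inc2_eq,
      PySem.Dict.mem_keys_insert, List.mem_cons]
    tauto

lemma pv_nodup_keys_fold (E : List (List Char × List Char)) (d : PySem.Dict (List Char) (Int × Int))
    (h : d.keys.Nodup) : (E.foldl pvStep d).keys.Nodup := by
  induction E generalizing d with
  | nil => exact h
  | cons ab E ih =>
    simp only [List.foldl_cons]
    apply ih
    rw [pvStep, pv_inc1_eq, pv_inc2_eq]
    apply PySem.Dict.nodup_keys_insert
    apply PySem.Dict.nodup_keys_insert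
    exact h

lemma pv_cc_fold (L : List (List Char × List Char))
    (c d : PySem.Dict (List Char) Int) :
    L.foldl (fun cc p => (cc.1.insert p.1 (cc.1.getD p.1 0 + 1), cc.2.insert p.2 (cc.2.getD p.2 0 + 1))) (c, d)
      = ((L.map Prod.fst).foldl (fun c a => c.insert a (c.getD a 0 + 1)) c,
         (L.map Prod.snd).foldl (fun c a => c.insert a (c.getD a 0 + 1)) d) := by
  induction L generalizing c d with
  | nil => rfl
  | cons p L ih => simp [ih]
lemma pv_foldl_if_add {β : Type} (l : List β) (a : Int) (c : β → Bool) (g : β → Int) :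
    l.foldl (fun r p => if c p then r + g p else r) a
      = a + (l.map (fun p => if c p then g p else 0)).sum := by
  induction l generalizing a with
  | nil => simp
  | cons p l ih =>
    simp only [List.foldl_cons, List.map_cons, List.sum_cons, ih]
    split <;> ring

-- core counting equivalence: the shared-dict sum of products equals the two-counter sum
lemma pv_counts_eq (E : List (List Char × List Char)) :
    (E.foldl pvStep PySem.Dict.empty).values.foldl (fun r v => r + v.1 * v.2) 0
      = (PySem.Dict.counter (E.map Prod.fst)).items.foldl
          (fun r p => if (PySem.Dict.counter (E.map Prod.snd)).contains p.1
                      then r + p.2 * (PySem.Dict.counter (E.map Prod.snd)).getD p.1 0 else r) 0 := by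
  have hnd : (E.foldl pvStep PySem.Dict.empty).keys.Nodup :=
    pv_nodup_keys_fold E _ (by rw [PySem.Dict.keys_empty]; exact List.nodup_nil)
  set F : List Char → Int :=
    fun s => ((E.map Prod.fst).count s : Int) * ((E.map Prod.snd).count s : Int) with hF
  -- LHS as a Finset sum over the shared dict's keys
  have hL : (E.foldl pvStep PySem.Dict.empty).values.foldl (fun r v => r + v.1 * v.2) 0
      = ∑ s ∈ (E.foldl pvStep PySem.Dict.empty).keys.toFinset, F s := by
    rw [PySem.Dict.values_eq_map_keys _ hnd (0,0), PySem.List.foldl_add, List.map_map,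
        List.sum_toFinset _ hnd]
    rw [zero_add]
    congr 1
    apply List.map_congr_left
    intro s hs
    simp only [Function.comp_apply, pv_getD_fold, PySem.Dict.getD_empty, zero_add, hF]
  -- RHS as a Finset sum over the distinct x-strings
  have hR : (PySem.Dict.counter (E.map Prod.fst)).items.foldl
          (fun r p => if (PySem.Dict.counter (E.map Prod.snd)).contains p.1
                      then r + p.2 * (PySem.Dict.counter (E.map Prod.snd)).getD p.1 0 else r) 0
      = ∑ s ∈ (PySem.Set.ofList (E.map Prod.fst)).toFinset, F s := by
    rw [pv_foldl_if_add, PySem.Dict.items_counter, List.map_map, zero_add,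
        List.sum_toFinset _ (PySem.Set.nodup_ofList _)]
    congr 1
    apply List.map_congr_left
    intro s hs
    simp only [Function.comp_apply, PySem.Dict.contains_counter, PySem.Dict.getD_counter, hF]
    by_cases hc : s ∈ E.map Prod.snd
    · simp [hc]
    · simp [hc, List.count_eq_zero_of_not_mem hc]
  rw [hL, hR]
  refine (Finset.sum_subset ?_ ?_).symm
  · intro s hs
    rw [List.mem_toFinset] at hs ⊢
    rw [pv_mem_keys_fold, PySem.Dict.keys_empty]
    right; left
    exact (PySem.Set.mem_ofList _ _).mp hs
  · intro s hs hns
    rw [List.mem_toFinset] at hns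
    rw [hF]
    have : s ∉ E.map Prod.fst := fun h => hns ((PySem.Set.mem_ofList _ _).mpr h)
    simp [List.count_eq_zero_of_not_mem this]

lemma pv_row_cast (cs : List Char) (k i : Int) (n tn : Nat) :
    pvRow cs k i (1 + (n : Int)) (tn : Int) = pvRowN cs k i n tn := by
  unfold pvRow pvRowN
  rw [show (1 + (n : Int)) - 1 = ((n : Nat) : Int) from by ring, PySem.List.pyRange_zero_natCast,
      List.map_map]
  congr 1
  apply List.map_congr_left
  intro p _
  simp only [Function.comp_apply, pv_bit_cast]
  rw [show i + k - (1 + (n : Int)) + (p : Int) = i + k - 1 - (n : Int) + (p : Int) from by ring]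

lemma pv_evB_eq (xs ys : List Char) (k i : Int) (hk : 1 ≤ k) :
    (PySem.List.pyRange 1 (k + 1) 1).flatMap (fun m =>
      (PySem.List.pyRange 0 (((1 <<< (m - 1).toNat : Nat) : Int)) 1).map (fun t =>
        (pvRow xs k i m t, pvRow ys k i m t)))
      = pvEv xs ys k i (k-1).toNat := by
  rw [PySem.List.pyRange_one, List.flatMap_map,
      show (k + 1 - 1).toNat = (k-1).toNat + 1 from by omega, pvEv]
  apply List.flatMap_congr
  intro n hn
  rw [show (1 + (n : Int) - 1).toNat = n from by omega, Nat.shiftLeft_eq, one_mul,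
      PySem.List.pyRange_zero_natCast, List.map_map, pv_stage_eq]
  apply List.map_congr_left
  intro t _
  simp only [Function.comp_apply]
  rw [pv_row_cast, pv_row_cast]

-- ===== VERDICT (by name: the statement is the Claim_ definition above) =====
-- B's counter pair after all three loops (proof-side abbreviation of B's port body)
def pvBDict (xs ys : List Char) (k : Int) : PySem.Dict (List Char) Int × PySem.Dict (List Char) Int :=
  (PySem.List.pyRange 0 ((xs.length : Int) - k) 1).foldl (fun cc i =>
    (PySem.List.pyRange 1 (k + 1) 1).foldl (fun cc m =>
      (PySem.List.pyRange 0 (((1 <<< (m - 1).toNat : Nat) : Int)) 1).foldl (fun cc t =>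
        (cc.1.insert (pvRow xs k i m t) (cc.1.getD (pvRow xs k i m t) 0 + 1),
         cc.2.insert (pvRow ys k i m t) (cc.2.getD (pvRow ys k i m t) 0 + 1))) cc) cc)
    ((PySem.Dict.empty : PySem.Dict (List Char) Int), (PySem.Dict.empty : PySem.Dict (List Char) Int))

theorem gapped_kernel_spec : Claim_equal_gapped_kernel := by
  intro x y k hdom hpre
  obtain ⟨hk, -⟩ := hpre
  show gapped_kernel x y k = gapped_kernel_alt x y k
  have hA : gapped_kernel x y k
      = ((PySem.List.pyRange 0 ((x.toList.length : Int) - k) 1).foldl (fun d i =>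
          let st0 := (d, ([[pvGet x.toList (i + k - 1)]] : List (List Char)), ([[pvGet y.toList (i + k - 1)]] : List (List Char)))
          let st := (PySem.List.pyRange 1 k 1).foldl (fun st j =>
            (st.2.1.zip st.2.2).foldl (fun st2 ab =>
              (pvInc2 (pvInc1 st2.1 ab.1) ab.2,
               st2.2.1 ++ [pvGet x.toList (i + k - j - 1) :: ab.1, 'N' :: ab.1],
               st2.2.2 ++ [pvGet y.toList (i + k - j - 1) :: ab.2, 'N' :: ab.2]))
              (st.1, ([] : List (List Char)), ([] : List (List Char)))) st0
          (st.2.1.zip st.2.2).foldl (fun d ab => pvInc2 (pvInc1 d ab.1) ab.2) st.1)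
          PySem.Dict.empty).values.foldl (fun r v => r + v.1 * v.2) 0 := rfl
  have hB : gapped_kernel_alt x y k
      = (pvBDict x.toList y.toList k).1.items.foldl
          (fun r p => if (pvBDict x.toList y.toList k).2.contains p.1
                      then r + p.2 * (pvBDict x.toList y.toList k).2.getD p.1 0 else r) 0 := rfl
  have hwin : (fun (d : PySem.Dict (List Char) (Int × Int)) (i : Int) =>
          let st0 := (d, ([[pvGet x.toList (i + k - 1)]] : List (List Char)), ([[pvGet y.toList (i + k - 1)]] : List (List Char)))
          let st := (PySem.List.pyRange 1 k 1).foldl (fun st j =>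
            (st.2.1.zip st.2.2).foldl (fun st2 ab =>
              (pvInc2 (pvInc1 st2.1 ab.1) ab.2,
               st2.2.1 ++ [pvGet x.toList (i + k - j - 1) :: ab.1, 'N' :: ab.1],
               st2.2.2 ++ [pvGet y.toList (i + k - j - 1) :: ab.2, 'N' :: ab.2]))
              (st.1, ([] : List (List Char)), ([] : List (List Char)))) st0
          (st.2.1.zip st.2.2).foldl (fun d ab => pvInc2 (pvInc1 d ab.1) ab.2) st.1)
      = fun d i => (pvEv x.toList y.toList k i (k-1).toNat).foldl pvStep d :=
    funext fun d => funext fun i => pv_window x.toList y.toList k i d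
  have hccB : (fun (cc : PySem.Dict (List Char) Int × PySem.Dict (List Char) Int) (i : Int) =>
          (PySem.List.pyRange 1 (k + 1) 1).foldl (fun cc m =>
            (PySem.List.pyRange 0 (((1 <<< (m - 1).toNat : Nat) : Int)) 1).foldl (fun cc t =>
              (cc.1.insert (pvRow x.toList k i m t) (cc.1.getD (pvRow x.toList k i m t) 0 + 1),
               cc.2.insert (pvRow y.toList k i m t) (cc.2.getD (pvRow y.toList k i m t) 0 + 1))) cc) cc)
      = fun cc i => (pvEv x.toList y.toList k i (k-1).toNat).foldl
          (fun cc p => (cc.1.insert p.1 (cc.1.getD p.1 0 + 1), cc.2.insert p.2 (cc.2.getD p.2 0 + 1))) cc := by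
    funext cc i
    rw [← pv_evB_eq x.toList y.toList k i hk, pv_foldl_flatMap]
    apply PySem.List.foldl_congr_mem
    intro acc m hm
    rw [List.foldl_map]
  have hBD : pvBDict x.toList y.toList k
      = (PySem.Dict.counter (((PySem.List.pyRange 0 ((x.toList.length : Int) - k) 1).flatMap
            (fun i => pvEv x.toList y.toList k i (k-1).toNat)).map Prod.fst),
         PySem.Dict.counter (((PySem.List.pyRange 0 ((x.toList.length : Int) - k) 1).flatMap
            (fun i => pvEv x.toList y.toList k i (k-1).toNat)).map Prod.snd)) := by
    unfold pvBDict
    rw [hccB, ← pv_foldl_flatMap, pv_cc_fold,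
        PySem.Dict.foldl_insert_getD_add_one_eq_counter, PySem.Dict.foldl_insert_getD_add_one_eq_counter]
  rw [hA, hwin, ← pv_foldl_flatMap, hB, hBD]
  exact pv_counts_eq _
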